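-- pv_equiv track=rewrite | github.com/pampuchpampuch/pangenome_tools | pgtools/maf_parser.py | count_mismatch_cols
-- ===== SOURCE A (Python) =====
-- def count_mismatch_cols(seq1, seq2):
--     """
--     Count number of columns where at list one sequence
--     has a gap character. Provided sequences have to be aligned.
--     """
--     assert len(seq1) == len(seq2)
--
--     n_gaps = 0
--     n_cols = 0
--     for i in range(len(seq1)):
--         if (seq1[i] == "-" or seq2[i] == "-"):
--             continue
--         elif seq1[i] != seq2[i]:
--             n_gaps +=1
--
--         n_cols += 1
--
--     return n_gaps, n_cols
-- ===== SOURCE B (Python) =====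
-- def count_mismatch_cols(seq1, seq2):
--     assert len(seq1) == len(seq2)
--     n = len(seq1)
--     gaps1 = sum(c == '-' for c in seq1)
--     gaps2 = sum(c == '-' for c in seq2)
--     both_gap = sum(a == '-' and b == '-' for a, b in zip(seq1, seq2))
--     eq = sum(a == b for a, b in zip(seq1, seq2))
--     # inclusion-exclusion: columns with a gap = gaps1 + gaps2 - both_gap
--     n_cols = n - (gaps1 + gaps2 - both_gap)
--     # equal pairs that are not both gaps are exactly the equal non-gap columns
--     n_gaps = n_cols - (eq - both_gap)
--     return n_gaps, n_cols
-- ===== Notes on version B (the rewrite author's own statement) =====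
-- stated objective: alternative
-- what changed: Replaces A's fused per-column loop by an inclusion-exclusion computation: count gaps in each sequence separately, both-gap columns and equal pairs, then derive n_cols = n - (gaps1+gaps2-both_gap) and n_gaps = n_cols - (eq-both_gap) arithmetically.
import Mathlib
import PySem

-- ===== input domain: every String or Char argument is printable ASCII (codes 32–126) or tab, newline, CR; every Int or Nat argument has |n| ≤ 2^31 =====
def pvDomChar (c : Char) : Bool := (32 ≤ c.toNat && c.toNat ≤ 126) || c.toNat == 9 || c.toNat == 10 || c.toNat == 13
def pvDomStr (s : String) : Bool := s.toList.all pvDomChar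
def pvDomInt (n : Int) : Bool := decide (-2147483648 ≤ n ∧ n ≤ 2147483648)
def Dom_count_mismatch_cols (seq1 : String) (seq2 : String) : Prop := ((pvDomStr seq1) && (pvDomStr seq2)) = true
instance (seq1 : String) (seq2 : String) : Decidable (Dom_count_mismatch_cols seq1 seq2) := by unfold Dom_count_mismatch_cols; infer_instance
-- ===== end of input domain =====

-- B replaces A's fused per-column loop by inclusion-exclusion over four independent
-- aggregate counts (gaps in each sequence, both-gap columns, equal pairs); same cost.

-- ===== PORT A =====
-- Fused single pass: for i in range(len(seq1)) updating (n_gaps, n_cols);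
-- pyGetD is exact here because i is always in range (Pre_ gives equal lengths).
def count_mismatch_cols (seq1 : String) (seq2 : String) : Int × Int :=
  let l1 := seq1.toList
  let l2 := seq2.toList
  (PySem.List.pyRange 0 (l1.length : Int) 1).foldl
    (fun (st : Int × Int) i =>
      if PySem.List.pyGetD l1 i ' ' = '-' ∨ PySem.List.pyGetD l2 i ' ' = '-' then st
      else if PySem.List.pyGetD l1 i ' ' ≠ PySem.List.pyGetD l2 i ' ' then
        (st.1 + 1, st.2 + 1)
      else (st.1, st.2 + 1))
    (0, 0)

-- ===== PORT B =====
-- The 0/1-sums of Source B are List.countP (a 0/1-sum IS countP); arithmetic as in Source B.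
def count_mismatch_cols_alt (seq1 : String) (seq2 : String) : Int × Int :=
  let l1 := seq1.toList
  let l2 := seq2.toList
  let n : Int := l1.length
  let gaps1 : Int := l1.countP (fun c => c == '-')
  let gaps2 : Int := l2.countP (fun c => c == '-')
  let both_gap : Int := (l1.zip l2).countP (fun p => p.1 == '-' && p.2 == '-')
  let eqc : Int := (l1.zip l2).countP (fun p => p.1 == p.2)
  let n_cols := n - (gaps1 + gaps2 - both_gap)
  let n_gaps := n_cols - (eqc - both_gap)
  (n_gaps, n_cols)

-- ===== PRECONDITION & SPEC =====
-- A raises AssertionError when the two strings have different lengths.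
def Pre_count_mismatch_cols (seq1 : String) (seq2 : String) : Prop :=
  seq1.toList.length = seq2.toList.length
instance (seq1 : String) (seq2 : String) : Decidable (Pre_count_mismatch_cols seq1 seq2) := by
  unfold Pre_count_mismatch_cols; infer_instance

def pvWitness_count_mismatch_cols : String × String := ("AC-GT", "A-CGA")

def Spec_count_mismatch_cols (seq1 : String) (seq2 : String) (out : Int × Int) : Prop := out = count_mismatch_cols_alt seq1 seq2
instance (seq1 : String) (seq2 : String) (out : Int × Int) : Decidable (Spec_count_mismatch_cols seq1 seq2 out) := by unfold Spec_count_mismatch_cols; infer_instance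

-- ===== CLAIM (what is proved, stated in full; the proofs are below) =====
def Claim_equal_count_mismatch_cols : Prop := ∀ (seq1 : String) (seq2 : String), Dom_count_mismatch_cols seq1 seq2 → Pre_count_mismatch_cols seq1 seq2 → Spec_count_mismatch_cols seq1 seq2 (count_mismatch_cols seq1 seq2)

-- ===== LEMMAS AND PROOFS =====

-- A's loop body, on a column pair.
def pvStep (st : Int × Int) (p : Char × Char) : Int × Int :=
  if p.1 = '-' ∨ p.2 = '-' then st
  else if p.1 ≠ p.2 then (st.1 + 1, st.2 + 1)
  else (st.1, st.2 + 1)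

-- A's indexed loop over range(len) = fold of pvStep over the zipped columns.
lemma pvIdx_eq (l1 l2 : List Char) (h : l1.length = l2.length) (init : Int × Int) :
    (PySem.List.pyRange 0 (l1.length : Int) 1).foldl
      (fun (st : Int × Int) i =>
        if PySem.List.pyGetD l1 i ' ' = '-' ∨ PySem.List.pyGetD l2 i ' ' = '-' then st
        else if PySem.List.pyGetD l1 i ' ' ≠ PySem.List.pyGetD l2 i ' ' then
          (st.1 + 1, st.2 + 1)
        else (st.1, st.2 + 1))
      init
    = (l1.zip l2).foldl pvStep init := by
  have hlen : ((l1.zip l2).length : Int) = (l1.length : Int) := by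
    simp [List.length_zip, h]
  rw [← hlen]
  rw [show (PySem.List.pyRange 0 ((l1.zip l2).length : Int) 1).foldl
      (fun (st : Int × Int) i =>
        if PySem.List.pyGetD l1 i ' ' = '-' ∨ PySem.List.pyGetD l2 i ' ' = '-' then st
        else if PySem.List.pyGetD l1 i ' ' ≠ PySem.List.pyGetD l2 i ' ' then
          (st.1 + 1, st.2 + 1)
        else (st.1, st.2 + 1)) init
    = (PySem.List.pyRange 0 ((l1.zip l2).length : Int) 1).foldl
      (fun (st : Int × Int) i => pvStep st (PySem.List.pyGetD (l1.zip l2) i (' ', ' '))) init from ?_]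
  · exact PySem.List.foldl_pyRange_zero_pyGetD (l1.zip l2) (' ', ' ') pvStep init
  · apply PySem.List.foldl_congr_mem
    intro st i hi
    have hmem := (PySem.List.mem_pyRange_one).1 hi
    have h0 : (0:Int) ≤ i := hmem.1
    have hz : i < ((l1.zip l2).length : Int) := hmem.2
    have h1 : i < (l1.length : Int) := by simpa [List.length_zip, h] using hz
    have h2 : i < (l2.length : Int) := by simpa [List.length_zip, h] using hz
    rw [PySem.List.pyGetD_eq_getElem _ (' ', ' ') h0 hz,
        PySem.List.pyGetD_eq_getElem _ ' ' h0 h1,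
        PySem.List.pyGetD_eq_getElem _ ' ' h0 h2]
    simp [pvStep, List.getElem_zip]

-- Fold of A's step over the zipped columns, characterised by two countP's.
lemma pvFold_countP (ps : List (Char × Char)) : ∀ (g c : Int),
    ps.foldl pvStep (g, c) =
      (g + (ps.countP (fun p => !(p.1 == '-') && !(p.2 == '-') && !(p.1 == p.2)) : Int),
       c + (ps.countP (fun p => !(p.1 == '-') && !(p.2 == '-')) : Int)) := by
  induction ps with
  | nil => intro g c; simp
  | cons p ps ih =>
    intro g c
    simp only [List.foldl_cons, List.countP_cons, pvStep]
    by_cases h1 : p.1 = '-'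
    · simp [h1, ih g c]
    · by_cases h2 : p.2 = '-'
      · simp [h1, h2, ih g c]
      · by_cases h3 : p.1 = p.2
        · simp [h2, h3, ih]; omega
        · simp [h1, h2, h3, ih]; omega

-- Inclusion-exclusion identities over the pair list (B's arithmetic).
lemma pvInclExcl (ps : List (Char × Char)) :
    ((ps.countP (fun p => !(p.1 == '-') && !(p.2 == '-')) : Int)
      = (ps.length : Int) - ((ps.countP (fun p => p.1 == '-') : Int)
          + (ps.countP (fun p => p.2 == '-') : Int)
          - (ps.countP (fun p => p.1 == '-' && p.2 == '-') : Int)))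
    ∧ ((ps.countP (fun p => !(p.1 == '-') && !(p.2 == '-') && !(p.1 == p.2)) : Int)
      = (ps.countP (fun p => !(p.1 == '-') && !(p.2 == '-')) : Int)
          - ((ps.countP (fun p => p.1 == p.2) : Int)
            - (ps.countP (fun p => p.1 == '-' && p.2 == '-') : Int))) := by
  induction ps with
  | nil => simp
  | cons p ps ih =>
    simp only [List.countP_cons, List.length_cons]
    by_cases h1 : p.1 = '-' <;> by_cases h2 : p.2 = '-' <;> by_cases h3 : p.1 = p.2 <;>
      simp_all <;> omega

-- Per-component count over the zip equals the count over each list (equal lengths).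
lemma pvZip_countP_left (l1 l2 : List Char) (h : l1.length = l2.length) :
    (l1.zip l2).countP (fun p => p.1 == '-') = l1.countP (fun c => c == '-') := by
  induction l1 generalizing l2 with
  | nil => simp
  | cons a l1 ih =>
    cases l2 with
    | nil => simp at h
    | cons b l2 => simp_all [List.countP_cons]

lemma pvZip_countP_right (l1 l2 : List Char) (h : l1.length = l2.length) :
    (l1.zip l2).countP (fun p => p.2 == '-') = l2.countP (fun c => c == '-') := by
  induction l1 generalizing l2 with
  | nil => cases l2 with | nil => simp | cons b l2 => simp at h
  | cons a l1 ih =>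
    cases l2 with
    | nil => simp at h
    | cons b l2 => simp_all [List.countP_cons]

-- ===== VERDICT (by name: the statement is the Claim_ definition above) =====
theorem count_mismatch_cols_spec : Claim_equal_count_mismatch_cols := by
  intro seq1 seq2 _ hpre
  unfold Spec_count_mismatch_cols count_mismatch_cols count_mismatch_cols_alt
  rw [pvIdx_eq seq1.toList seq2.toList hpre, pvFold_countP]
  obtain ⟨hc, hg⟩ := pvInclExcl (seq1.toList.zip seq2.toList)
  rw [pvZip_countP_left _ _ hpre, pvZip_countP_right _ _ hpre] at hc
  simp only [zero_add]
  have hl : seq1.toList.length = seq2.toList.length := hpre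
  exact Prod.ext (by rw [hg, hc]; push_cast [List.length_zip]; omega)
                 (by rw [hc]; push_cast [List.length_zip]; omega)
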